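-- pv_equiv track=rewrite | github.com/gauraviitp/Python | Mixtures.py | solve
-- ===== SOURCE A (Python) =====
-- inf = int(1e100)
--
-- def solve(li):
--     n = len(li)
--     dp = [[0 for j in range(n)] for i in range(n)]
--     sums = []
--     for i in range(n):
--         row = [0] * n
--         sum = 0
--         for j in range(i, n):
--             sum = (sum + li[j]) % 100
--             row[j] = sum
--         sums.append(row)
--
--     for k in range(1, n):
--         for i in range(n - k):
--             st, en = i, i + k
--             val = inf
--             for p in range(st, en):
--                 if val > dp[st][p] + dp[p + 1][en] + sums[st][p] * sums[p + 1][en]: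
--                     val = dp[st][p] + dp[p + 1][en] + sums[st][p] * sums[p + 1][en]
--             dp[st][en] = val
--     return dp[0][n - 1]
-- ===== SOURCE B (Python) =====
-- inf = int(1e100)
--
-- def solve(li):
--     # top-down memoized interval DP over prefix sums (recursive: Python's
--     # recursion-depth limit applies to very long inputs)
--     n = len(li)
--     pre = [0]
--     for x in li:
--         pre.append(pre[-1] + x)
--     memo = {}
--
--     def f(i, j):
--         if i >= j:
--             return 0
--         if (i, j) in memo:
--             return memo[(i, j)]
--         best = inf
--         for p in range(i, j):
--             best = min(best, f(i, p) + f(p + 1, j)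
--                        + ((pre[p + 1] - pre[i]) % 100) * ((pre[j + 1] - pre[p + 1]) % 100))
--         memo[(i, j)] = best
--         return best
--
--     return f(0, n - 1)
-- ===== Notes on version B (the rewrite author's own statement) =====
-- stated objective: alternative
-- what changed: Bottom-up interval DP over explicit 2D tables (with an O(n^2) precomputed interval-sum table) is replaced by top-down memoized recursion f(i,j) over a dict, with interval sums computed on demand from a 1D prefix-sum array.
-- crash fix: On the empty list A raises IndexError (dp[0] on an empty table); B returns 0 (no mixing needed). — e.g. on solve([]): A raises IndexError, B returns 0
import Mathlib
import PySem

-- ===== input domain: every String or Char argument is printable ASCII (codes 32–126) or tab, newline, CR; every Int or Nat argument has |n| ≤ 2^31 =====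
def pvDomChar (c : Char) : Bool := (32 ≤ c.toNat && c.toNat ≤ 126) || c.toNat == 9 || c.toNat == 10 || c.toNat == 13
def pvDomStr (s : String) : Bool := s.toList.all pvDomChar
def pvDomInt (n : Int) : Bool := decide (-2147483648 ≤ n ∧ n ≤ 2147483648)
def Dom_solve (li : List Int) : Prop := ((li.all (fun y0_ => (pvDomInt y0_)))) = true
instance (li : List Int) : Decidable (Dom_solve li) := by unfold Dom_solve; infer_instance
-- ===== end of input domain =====

-- B replaces A's bottom-up interval-DP tables by top-down memoized recursion over a
-- 1D prefix-sum array; same return values, no argument is mutated. (B's Python is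
-- recursive, so Python's recursion-depth limit applies to very long inputs; no speed
-- improvement is claimed.)

def pvInf : Int := 10 ^ 100

-- ===== PORT A =====
-- arrays dp/sums are ported as update functions Int → Int → Int (same loops, same
-- traversal order, same intermediate values; all Python indexing stays in range on Pre_);
-- each loop of A is a named foldl helper
def rowStepA (li : List Int) (rs : (Int → Int) × Int) (j : Int) : (Int → Int) × Int :=
  let s := PySem.Int.mod (rs.2 + PySem.List.pyGetD li j 0) 100
  (fun j' => if j' = j then s else rs.1 j', s)

-- the sums table: sums[i][j] = stepwise (sum + li[j]) % 100
def sumsA (li : List Int) : Int → Int → Int :=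
  (PySem.List.pyRange 0 (li.length : Int) 1).foldl (fun sums i =>
    let res := (PySem.List.pyRange i (li.length : Int) 1).foldl (rowStepA li) ((fun _ => (0 : Int)), (0 : Int))
    fun i' => if i' = i then res.1 else sums i') (fun _ _ => 0)

-- the innermost p-loop: val starts at inf and is lowered on strict improvement
def valA (li : List Int) (dp : Int → Int → Int) (st en : Int) : Int :=
  (PySem.List.pyRange st en 1).foldl (fun val p =>
    if val > dp st p + dp (p + 1) en + sumsA li st p * sumsA li (p + 1) en then
      dp st p + dp (p + 1) en + sumsA li st p * sumsA li (p + 1) en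
    else val) pvInf

-- dp[st][en] = val  (st = i, en = i + k)
def dpStepA (li : List Int) (k : Int) (dp : Int → Int → Int) (i : Int) : Int → Int → Int :=
  fun i' j' => if i' = i ∧ j' = i + k then valA li dp i (i + k) else dp i' j'

def dpA (li : List Int) : Int → Int → Int :=
  (PySem.List.pyRange 1 (li.length : Int) 1).foldl (fun dp k =>
    (PySem.List.pyRange 0 ((li.length : Int) - k) 1).foldl (dpStepA li k) dp) (fun _ _ => 0)

def solve (li : List Int) : Int := dpA li 0 ((li.length : Int) - 1)

-- ===== PORT B =====
-- interval cost: ((pre[p+1]-pre[i]) % 100) * ((pre[j+1]-pre[p+1]) % 100)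
def pvCost (pre : List Int) (i j p : Int) : Int :=
  PySem.Int.mod (PySem.List.pyGetD pre (p + 1) 0 - PySem.List.pyGetD pre i 0) 100 *
  PySem.Int.mod (PySem.List.pyGetD pre (j + 1) 0 - PySem.List.pyGetD pre (p + 1) 0) 100

-- memoized f(i,j); the Python recursion is ported with a fuel argument (solve_alt
-- passes li.length, always enough since every call shrinks j - i)
def fB (pre : List Int) : Nat → Int → Int → PySem.Dict (Int × Int) Int →
    Int × PySem.Dict (Int × Int) Int
  | 0, _, _, memo => (0, memo)
  | fuel + 1, i, j, memo =>
    if j ≤ i then (0, memo)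
    else
      match memo.get? (i, j) with
      | some v => (v, memo)
      | none =>
        let res := (PySem.List.pyRange i j 1).foldl
          (fun (acc : Int × PySem.Dict (Int × Int) Int) p =>
            let r1 := fB pre fuel i p acc.2
            let r2 := fB pre fuel (p + 1) j r1.2
            (min acc.1 (r1.1 + r2.1 + pvCost pre i j p), r2.2)) (pvInf, memo)
        (res.1, res.2.insert (i, j) res.1)

def solve_alt (li : List Int) : Int :=
  let pre := li.foldl (fun pre x => pre ++ [PySem.List.pyGetD pre (-1) 0 + x]) [0]
  (fB pre li.length 0 ((li.length : Int) - 1) PySem.Dict.empty).1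

-- ===== PRECONDITION & SPEC =====
-- Pre_ excludes only the empty list, on which A raises IndexError (dp[0] on an empty table).
def Pre_solve (li : List Int) : Prop := li ≠ []
instance (li : List Int) : Decidable (Pre_solve li) := by unfold Pre_solve; infer_instance
def pvWitness_solve : List Int := [40, 60, 20]

-- On the empty list A raises IndexError; B returns 0 (no mixing needed).
def Raises_solve (li : List Int) : Prop := li = []
instance (li : List Int) : Decidable (Raises_solve li) := by unfold Raises_solve; infer_instance
def pvRaiseWitness_solve : List Int := []
def pvRaiseWitnessOut_solve : Int := 0

def Spec_solve (li : List Int) (out : Int) : Prop := out = solve_alt li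
instance (li : List Int) (out : Int) : Decidable (Spec_solve li out) := by unfold Spec_solve; infer_instance

-- ===== CLAIM (what is proved, stated in full; the proofs are below) =====
def Claim_equal_solve : Prop := ∀ (li : List Int), Dom_solve li → Pre_solve li → Spec_solve li (solve li)
def Claim_raises_solve : Prop := (∀ (li : List Int), Dom_solve li → Raises_solve li → ¬ Pre_solve li) ∧ (Dom_solve (pvRaiseWitness_solve) ∧ Raises_solve (pvRaiseWitness_solve) ∧ solve_alt (pvRaiseWitness_solve) = pvRaiseWitnessOut_solve)

-- ===== LEMMAS AND PROOFS =====

-- fueled pure specification of the recurrence (min over splits, started at pvInf)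
def Fs (pre : List Int) : Nat → Int → Int → Int
  | 0, _, _ => 0
  | fuel + 1, i, j =>
    if j ≤ i then 0
    else (PySem.List.pyRange i j 1).foldl
      (fun val p => min val (Fs pre fuel i p + Fs pre fuel (p + 1) j + pvCost pre i j p)) pvInf

theorem Fs_mono_aux (pre : List Int) : ∀ (g f1 f2 : Nat) (i j : Int),
    (j - i).toNat ≤ g → (j - i).toNat < f1 → (j - i).toNat < f2 →
    Fs pre f1 i j = Fs pre f2 i j := by
  intro g
  induction g with
  | zero =>
    intro f1 f2 i j hg h1 h2
    obtain ⟨a, rfl⟩ : ∃ a, f1 = a + 1 := ⟨f1 - 1, by omega⟩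
    obtain ⟨b, rfl⟩ : ∃ b, f2 = b + 1 := ⟨f2 - 1, by omega⟩
    have hji : j ≤ i := by omega
    simp only [Fs, if_pos hji]
  | succ g ih =>
    intro f1 f2 i j hg h1 h2
    obtain ⟨a, rfl⟩ : ∃ a, f1 = a + 1 := ⟨f1 - 1, by omega⟩
    obtain ⟨b, rfl⟩ : ∃ b, f2 = b + 1 := ⟨f2 - 1, by omega⟩
    by_cases hji : j ≤ i
    · simp only [Fs, if_pos hji]
    · simp only [Fs, if_neg hji]
      apply PySem.List.foldl_congr_mem
      intro acc p hp
      rw [PySem.List.mem_pyRange_one] at hp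
      rw [ih a b i p (by omega) (by omega) (by omega),
          ih a b (p + 1) j (by omega) (by omega) (by omega)]

theorem Fs_mono (pre : List Int) (f1 f2 : Nat) (i j : Int)
    (h1 : (j - i).toNat < f1) (h2 : (j - i).toNat < f2) :
    Fs pre f1 i j = Fs pre f2 i j :=
  Fs_mono_aux pre ((j - i).toNat) f1 f2 i j le_rfl h1 h2

def F (pre : List Int) (i j : Int) : Int := Fs pre ((j - i).toNat + 1) i j

theorem F_le (pre : List Int) (i j : Int) (h : i < j) :
    F pre i j = (PySem.List.pyRange i j 1).foldl
      (fun val p => min val (F pre i p + F pre (p + 1) j + pvCost pre i j p)) pvInf := by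
  conv_lhs => rw [F]
  simp only [Fs, if_neg (by omega : ¬ j ≤ i)]
  apply PySem.List.foldl_congr_mem
  intro acc p hp
  rw [PySem.List.mem_pyRange_one] at hp
  rw [Fs_mono pre ((j - i).toNat) ((p - i).toNat + 1) i p (by omega) (by omega),
      Fs_mono pre ((j - i).toNat) ((j - (p + 1)).toNat + 1) (p + 1) j (by omega) (by omega)]
  simp only [F]

theorem F_base (pre : List Int) (i j : Int) (h : j ≤ i) : F pre i j = 0 := by
  simp only [F, Fs, if_pos h]

def GoodMemo (pre : List Int) (memo : PySem.Dict (Int × Int) Int) : Prop :=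
  ∀ i j v, memo.get? (i, j) = some v → v = F pre i j

theorem fB_loop (pre : List Int) (fuel : Nat) (i j : Int)
    (IH : ∀ (i' j' : Int) (m : PySem.Dict (Int × Int) Int), (j' - i').toNat < fuel →
      GoodMemo pre m → (fB pre fuel i' j' m).1 = F pre i' j' ∧ GoodMemo pre (fB pre fuel i' j' m).2) :
    ∀ (l : List Int), (∀ p ∈ l, (p - i).toNat < fuel ∧ (j - (p + 1)).toNat < fuel) →
    ∀ (b : Int) (memo : PySem.Dict (Int × Int) Int), GoodMemo pre memo →
    (l.foldl (fun (acc : Int × PySem.Dict (Int × Int) Int) p =>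
        (min acc.1 ((fB pre fuel i p acc.2).1 + (fB pre fuel (p + 1) j (fB pre fuel i p acc.2).2).1
            + pvCost pre i j p),
         (fB pre fuel (p + 1) j (fB pre fuel i p acc.2).2).2)) (b, memo)).1
      = l.foldl (fun val p => min val (F pre i p + F pre (p + 1) j + pvCost pre i j p)) b
    ∧ GoodMemo pre (l.foldl (fun (acc : Int × PySem.Dict (Int × Int) Int) p =>
        (min acc.1 ((fB pre fuel i p acc.2).1 + (fB pre fuel (p + 1) j (fB pre fuel i p acc.2).2).1
            + pvCost pre i j p),
         (fB pre fuel (p + 1) j (fB pre fuel i p acc.2).2).2)) (b, memo)).2 := by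
  intro l
  induction l with
  | nil => intro _ b memo hg; exact ⟨rfl, hg⟩
  | cons p l ihl =>
    intro hl b memo hg
    obtain ⟨hp1, hp2⟩ := hl p List.mem_cons_self
    obtain ⟨e1, g1⟩ := IH i p memo hp1 hg
    obtain ⟨e2, g2⟩ := IH (p + 1) j _ hp2 g1
    simp only [List.foldl_cons, e1, e2]
    exact ihl (fun q hq => hl q (List.mem_cons_of_mem _ hq)) _ _ g2

theorem fB_correct (pre : List Int) : ∀ (fuel : Nat) (i j : Int) (memo : PySem.Dict (Int × Int) Int),
    (j - i).toNat < fuel → GoodMemo pre memo →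
    (fB pre fuel i j memo).1 = F pre i j ∧ GoodMemo pre (fB pre fuel i j memo).2 := by
  intro fuel
  induction fuel with
  | zero => intro i j memo h; omega
  | succ fuel IH =>
    intro i j memo h hg
    by_cases hji : j ≤ i
    · simp only [fB, if_pos hji]
      exact ⟨(F_base pre i j hji).symm, hg⟩
    · rcases hm : PySem.Dict.get? memo (i, j) with _ | v
      · have hl : ∀ p ∈ PySem.List.pyRange i j 1,
            (p - i).toNat < fuel ∧ (j - (p + 1)).toNat < fuel := by
          intro p hp
          rw [PySem.List.mem_pyRange_one] at hp
          omega
        obtain ⟨e, g⟩ := fB_loop pre fuel i j IH (PySem.List.pyRange i j 1) hl pvInf memo hg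
        simp only [fB, if_neg hji, hm]
        constructor
        · rw [e, F_le pre i j (by omega)]
        · intro i' j' v hv
          rw [PySem.Dict.get?_insert] at hv
          by_cases hij : (i', j') = (i, j)
          · rw [if_pos hij] at hv
            cases hv
            obtain ⟨rfl, rfl⟩ := Prod.mk.injEq .. ▸ hij
            rw [e, F_le pre i' j' (by omega)]
          · rw [if_neg hij] at hv
            exact g i' j' v hv
      · simp only [fB, if_neg hji, hm]
        exact ⟨hg i j v hm, hg⟩

def preOf (li : List Int) : List Int :=
  li.foldl (fun pre x => pre ++ [PySem.List.pyGetD pre (-1) 0 + x]) [0]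

theorem solve_alt_eq (li : List Int) :
    solve_alt li = F (preOf li) 0 ((li.length : Int) - 1) := by
  have hg : GoodMemo (preOf li) PySem.Dict.empty := by
    intro i j v hv
    rw [PySem.Dict.get?_empty] at hv
    cases hv
  rcases li with _ | ⟨x, xs⟩
  · decide
  · exact (fB_correct (preOf (x :: xs)) (x :: xs).length 0 (((x :: xs).length : Int) - 1)
      PySem.Dict.empty (by simp) hg).1

-- prefix sums: the list built by B's foldl, characterised entrywise
def tailsPre (a : Int) : List Int → List Int
  | [] => []
  | x :: xs => (a + x) :: tailsPre (a + x) xs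

theorem build_pre : ∀ (li acc : List Int) (h : acc ≠ []),
    li.foldl (fun pre x => pre ++ [PySem.List.pyGetD pre (-1) 0 + x]) acc
      = acc ++ tailsPre (acc.getLast h) li := by
  intro li
  induction li with
  | nil => intro acc h; simp [tailsPre]
  | cons x xs ih =>
    intro acc h
    rw [List.foldl_cons, PySem.List.pyGetD_neg_one acc (0 : Int) h,
        ih (acc ++ [acc.getLast h + x]) (by simp),
        List.getLast_append_of_ne_nil (by simp)]
    · simp [tailsPre]
    · simp

theorem preOf_eq (li : List Int) : preOf li = 0 :: tailsPre 0 li := by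
  rw [preOf, build_pre li [0] (by simp)]
  rfl

theorem sum_take_succ (l : List Int) (k : Nat) (h : k < l.length) :
    (l.take (k + 1)).sum = (l.take k).sum + l[k] := by
  induction l generalizing k with
  | nil => simp at h
  | cons x xs ih =>
    cases k with
    | zero => simp
    | succ k =>
      simp only [List.take_succ_cons, List.sum_cons, List.getElem_cons_succ,
        ih k (by simpa using h)]
      ring

theorem tails_getElem? : ∀ (li : List Int) (a : Int) (k : Nat), k < li.length →
    (tailsPre a li)[k]? = some (a + (li.take (k + 1)).sum) := by
  intro li
  induction li with
  | nil => intro a k h; simp at h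
  | cons x xs ih =>
    intro a k h
    cases k with
    | zero => simp [tailsPre]
    | succ k =>
      simp only [tailsPre, List.getElem?_cons_succ, ih (a + x) k (by simpa using h)]
      simp only [List.take_succ_cons, List.sum_cons]
      congr 1
      ring

theorem preGet (li : List Int) (k : Nat) (h : k ≤ li.length) :
    PySem.List.pyGetD (preOf li) (k : Int) 0 = (li.take k).sum := by
  rw [preOf_eq, PySem.List.pyGetD_natCast]
  cases k with
  | zero => simp
  | succ k =>
    have := tails_getElem? li 0 k (by omega)
    simp only [List.getD, List.getElem?_cons_succ, this]
    simp

theorem preGetI (li : List Int) (t : Int) (h0 : 0 ≤ t) (h : t ≤ (li.length : Int)) :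
    PySem.List.pyGetD (preOf li) t 0 = (li.take t.toNat).sum := by
  have h1 := preGet li t.toNat (by omega)
  rw [show ((t.toNat : Nat) : Int) = t from by omega] at h1
  exact h1

-- mathematical interval sum mod 100
def SP (li : List Int) (a b : Int) : Int :=
  PySem.Int.mod ((li.take (b + 1).toNat).sum - (li.take a.toNat).sum) 100

theorem pvCost_eq (li : List Int) (i j p : Int)
    (h0 : 0 ≤ i) (h1 : i ≤ p) (h2 : p < j) (h3 : j < (li.length : Int)) :
    pvCost (preOf li) i j p = SP li i p * SP li (p + 1) j := by
  unfold pvCost SP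
  rw [preGetI li (p + 1) (by omega) (by omega), preGetI li i (by omega) (by omega),
      preGetI li (j + 1) (by omega) (by omega)]

theorem mod100_absorb (x y : Int) :
    PySem.Int.mod (PySem.Int.mod x 100 + y) 100 = PySem.Int.mod (x + y) 100 := by
  simp only [PySem.Int.mod_eq_emod_of_pos (show (0 : Int) < 100 by norm_num)]
  omega

-- the inner row loop of sumsA
theorem rowLoop (li : List Int) (i : Int) (hi : 0 ≤ i) : ∀ (g : Nat) (m : Int), i ≤ m →
    (((li.length : Int)) - m).toNat ≤ g → ∀ (row0 : Int → Int) (j' : Int),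
    ((PySem.List.pyRange m (li.length : Int) 1).foldl (rowStepA li)
        (row0, PySem.Int.mod ((li.take m.toNat).sum - (li.take i.toNat).sum) 100)).1 j'
      = if m ≤ j' ∧ j' < (li.length : Int) then SP li i j' else row0 j' := by
  intro g
  induction g with
  | zero =>
    intro m him hg row0 j'
    rw [PySem.List.pyRange_one_eq_nil (by omega), List.foldl_nil, if_neg (by omega)]
  | succ g ih =>
    intro m him hg row0 j'
    by_cases hm : m < (li.length : Int)
    · rw [PySem.List.pyRange_one_cons hm, List.foldl_cons]
      have hli : PySem.List.pyGetD li m 0 = li[m.toNat] := by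
        apply PySem.List.pyGetD_eq_getElem <;> omega
      have hstep : rowStepA li (row0, PySem.Int.mod ((li.take m.toNat).sum - (li.take i.toNat).sum) 100) m
          = (fun j' => if j' = m then SP li i m else row0 j',
             PySem.Int.mod ((li.take (m + 1).toNat).sum - (li.take i.toNat).sum) 100) := by
        unfold rowStepA
        have hs : PySem.Int.mod (PySem.Int.mod ((li.take m.toNat).sum - (li.take i.toNat).sum) 100 + PySem.List.pyGetD li m 0) 100
            = PySem.Int.mod ((li.take (m + 1).toNat).sum - (li.take i.toNat).sum) 100 := by
          rw [hli, mod100_absorb]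
          have : (li.take ((m + 1).toNat)).sum = (li.take m.toNat).sum + li[m.toNat] := by
            have h1 : (m + 1).toNat = m.toNat + 1 := by omega
            rw [h1]
            exact sum_take_succ li m.toNat (by omega)
          rw [this]
          ring_nf
        simp only [hs]
        rfl
      rw [hstep, ih (m + 1) (by omega) (by omega)]
      by_cases hj1 : m + 1 ≤ j' ∧ j' < (li.length : Int)
      · rw [if_pos hj1, if_pos (by omega)]
      · rw [if_neg hj1]
        by_cases hj2 : j' = m
        · subst hj2
          rw [if_pos rfl, if_pos (by omega)]
        · rw [if_neg hj2, if_neg (by omega)]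
    · rw [PySem.List.pyRange_one_eq_nil (by omega), List.foldl_nil, if_neg (by omega)]

-- the sums table equals the interval sums mod 100
theorem sumsLoop (li : List Int) : ∀ (g : Nat) (m : Int), 0 ≤ m →
    (((li.length : Int)) - m).toNat ≤ g → ∀ (s0 : Int → Int → Int) (a b : Int),
    ((PySem.List.pyRange m (li.length : Int) 1).foldl (fun sums i =>
        let res := (PySem.List.pyRange i (li.length : Int) 1).foldl (rowStepA li) ((fun _ => (0 : Int)), (0 : Int))
        fun i' => if i' = i then res.1 else sums i') s0) a b
      = if m ≤ a ∧ a < (li.length : Int) then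
          (if a ≤ b ∧ b < (li.length : Int) then SP li a b else 0)
        else s0 a b := by
  intro g
  induction g with
  | zero =>
    intro m hm hg s0 a b
    rw [PySem.List.pyRange_one_eq_nil (by omega), List.foldl_nil, if_neg (by omega)]
  | succ g ih =>
    intro m hm hg s0 a b
    by_cases hmn : m < (li.length : Int)
    · rw [PySem.List.pyRange_one_cons hmn, List.foldl_cons]
      have hrow : ((PySem.List.pyRange m (li.length : Int) 1).foldl (rowStepA li)
          ((fun _ => (0 : Int)), (0 : Int))).1 b
          = if m ≤ b ∧ b < (li.length : Int) then SP li m b else 0 := by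
        have h1 := rowLoop li m hm (((li.length : Int)) - m).toNat m le_rfl le_rfl
          (fun _ => (0 : Int)) b
        rw [sub_self, show PySem.Int.mod (0 : Int) 100 = 0 from by
          rw [PySem.Int.mod_eq_emod_of_pos (show (0 : Int) < 100 by norm_num)]
          simp] at h1
        exact h1
      rw [ih (m + 1) (by omega) (by omega)]
      by_cases ha1 : m + 1 ≤ a ∧ a < (li.length : Int)
      · rw [if_pos ha1, if_pos (show m ≤ a ∧ a < (li.length : Int) from by omega)]
      · rw [if_neg ha1]
        by_cases ha2 : a = m
        · subst ha2
          simp only [if_true]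
          rw [hrow, if_pos (show a ≤ a ∧ a < (li.length : Int) from ⟨le_rfl, hmn⟩)]
        · simp only [if_neg ha2]
          rw [if_neg (by omega)]
    · rw [PySem.List.pyRange_one_eq_nil (by omega), List.foldl_nil, if_neg (by omega)]

theorem sumsA_eq (li : List Int) (a b : Int) (h0 : 0 ≤ a) (hab : a ≤ b)
    (hb : b < (li.length : Int)) : sumsA li a b = SP li a b := by
  unfold sumsA
  rw [sumsLoop li ((li.length : Int)).toNat 0 le_rfl (by omega) _ a b,
      if_pos ⟨h0, by omega⟩, if_pos ⟨hab, hb⟩]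

-- the innermost p-loop computes F
theorem valA_eq (li : List Int) (dp : Int → Int → Int) (k st : Int)
    (hk : 1 ≤ k) (hst : 0 ≤ st) (hen : st + k < (li.length : Int))
    (hdp : ∀ a b, 0 ≤ a → a ≤ b → b < (li.length : Int) → b - a < k → dp a b = F (preOf li) a b) :
    valA li dp st (st + k) = F (preOf li) st (st + k) := by
  rw [F_le (preOf li) st (st + k) (by omega)]
  unfold valA
  apply PySem.List.foldl_congr_mem
  intro val p hp
  rw [PySem.List.mem_pyRange_one] at hp
  rw [hdp st p hst hp.1 (by omega) (by omega),
      hdp (p + 1) (st + k) (by omega) (by omega) (by omega) (by omega),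
      sumsA_eq li st p hst hp.1 (by omega),
      sumsA_eq li (p + 1) (st + k) (by omega) (by omega) (by omega),
      ← pvCost_eq li st (st + k) p hst hp.1 (by omega) (by omega)]
  rw [min_def]
  split_ifs <;> omega

-- the i-loop at level k
theorem dpInner (li : List Int) (k : Int) (hk : 1 ≤ k) : ∀ (g : Nat) (m : Int), 0 ≤ m →
    (((li.length : Int) - k) - m).toNat ≤ g → ∀ (dp : Int → Int → Int),
    (∀ a b, dp a b = if 0 ≤ a ∧ a ≤ b ∧ b < (li.length : Int) ∧ (b - a < k ∨ (b - a = k ∧ a < m))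
        then F (preOf li) a b else 0) →
    ∀ a b, ((PySem.List.pyRange m ((li.length : Int) - k) 1).foldl (dpStepA li k) dp) a b
      = if 0 ≤ a ∧ a ≤ b ∧ b < (li.length : Int) ∧ (b - a < k ∨ b - a = k)
        then F (preOf li) a b else 0 := by
  intro g
  induction g with
  | zero =>
    intro m hm hg dp hdp a b
    rw [PySem.List.pyRange_one_eq_nil (by omega), List.foldl_nil, hdp a b]
    split_ifs <;> first | rfl | omega
  | succ g ih =>
    intro m hm hg dp hdp a b
    by_cases hmn : m < (li.length : Int) - k
    · rw [PySem.List.pyRange_one_cons hmn, List.foldl_cons]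
      have hreads : ∀ a b, 0 ≤ a → a ≤ b → b < (li.length : Int) → b - a < k →
          dp a b = F (preOf li) a b := by
        intro a b h1 h2 h3 h4
        rw [hdp a b, if_pos ⟨h1, h2, h3, Or.inl h4⟩]
      have hval : valA li dp m (m + k) = F (preOf li) m (m + k) :=
        valA_eq li dp k m hk hm (by omega) hreads
      apply ih (m + 1) (by omega) (by omega)
      intro a b
      unfold dpStepA
      by_cases hab : a = m ∧ b = m + k
      · rw [if_pos hab]
        obtain ⟨rfl, rfl⟩ := hab
        rw [hval, if_pos ⟨hm, by omega, by omega, Or.inr ⟨by omega, by omega⟩⟩]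
      · rw [if_neg hab, hdp a b]
        split_ifs <;> first | rfl | omega
    · rw [PySem.List.pyRange_one_eq_nil (by omega), List.foldl_nil, hdp a b]
      split_ifs <;> first | rfl | omega

-- the outer k-loop
theorem dpOuter (li : List Int) : ∀ (g : Nat) (k : Int), 1 ≤ k →
    ((li.length : Int) - k).toNat ≤ g → ∀ (dp : Int → Int → Int),
    (∀ a b, dp a b = if 0 ≤ a ∧ a ≤ b ∧ b < (li.length : Int) ∧ b - a < k
        then F (preOf li) a b else 0) →
    ∀ a b, ((PySem.List.pyRange k (li.length : Int) 1).foldl (fun dp k =>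
        (PySem.List.pyRange 0 ((li.length : Int) - k) 1).foldl (dpStepA li k) dp) dp) a b
      = if 0 ≤ a ∧ a ≤ b ∧ b < (li.length : Int) then F (preOf li) a b else 0 := by
  intro g
  induction g with
  | zero =>
    intro k hk hg dp hdp a b
    rw [PySem.List.pyRange_one_eq_nil (by omega), List.foldl_nil, hdp a b]
    split_ifs <;> first | rfl | omega
  | succ g ih =>
    intro k hk hg dp hdp a b
    by_cases hkn : k < (li.length : Int)
    · rw [PySem.List.pyRange_one_cons hkn, List.foldl_cons]
      apply ih (k + 1) (by omega) (by omega)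
      intro a b
      rw [dpInner li k hk (((li.length : Int) - k)).toNat 0 le_rfl (by omega) dp
          (by intro a b; rw [hdp a b]; split_ifs <;> first | rfl | omega) a b]
      split_ifs <;> first | rfl | omega
    · rw [PySem.List.pyRange_one_eq_nil (by omega), List.foldl_nil, hdp a b]
      split_ifs <;> first | rfl | omega

theorem solve_eq (li : List Int) (h : li ≠ []) :
    solve li = F (preOf li) 0 ((li.length : Int) - 1) := by
  have hn : 1 ≤ (li.length : Int) := by
    cases li with
    | nil => exact absurd rfl h
    | cons x xs => simp
  unfold solve dpA
  rw [dpOuter li ((li.length : Int) - 1).toNat 1 le_rfl (by omega) (fun _ _ => 0)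
      (by
        intro a b
        split_ifs with hc
        · rw [F_base (preOf li) a b (by omega)]
        · rfl) 0 ((li.length : Int) - 1),
      if_pos ⟨le_rfl, by omega, by omega⟩]

-- ===== VERDICT (by name: the statement is the Claim_ definition above) =====
theorem solve_spec : Claim_equal_solve := by
  intro li _ hpre
  unfold Spec_solve
  rw [solve_eq li hpre, solve_alt_eq li]

theorem solve_raises : Claim_raises_solve := by
  unfold Claim_raises_solve
  exact ⟨fun li _ h => by simp [Raises_solve, Pre_solve] at *; exact h, by decide⟩

-- witness self-check: the crash-fix witness facts, extracted from solve_raises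
theorem pvRaiseWitness_ok : Dom_solve pvRaiseWitness_solve ∧ Raises_solve pvRaiseWitness_solve ∧
    solve_alt pvRaiseWitness_solve = pvRaiseWitnessOut_solve := solve_raises.2
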